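-- pv_equiv track=rewrite | github.com/MarcoBolo001/Encryption-and-Authentication | ciphers.py | decrypt_cbc
-- ===== SOURCE A (Python) =====
-- def vigenere_decipher_ascii(ciphertext, key):
--     key_extended = key  # Initialize the key with the original key
--     plaintext = []
--
--     for i in range(len(ciphertext)):
--         char = ciphertext[i]
--         shift = ord(key_extended[i])
--         shifted_index = (ord(char) - shift) % 256
--         decrypted_char = chr(shifted_index)
--         plaintext.append(decrypted_char)
--         key_extended += decrypted_char  # Add the decrypted character to the key
--
--     return ''.join(plaintext)
--
-- def invert_key(key):
--     inverted_key = [''] * len(key)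
--     for i, k in enumerate(key):   # create the inverted key for decryption
--         inverted_key[int(k) - 1] = str(i + 1)
--     return ''.join(inverted_key)
--
-- def transposition_decipher_ascii(ciphertext, key):
--     num_rows = len(ciphertext) // len(key)
--     key = invert_key(key)
--     matrix = [''] * num_rows
--     index = 0
--     for i in range(len(key)):
--         col_len = num_rows
--         for j in range(col_len):
--             matrix[j] += ciphertext[index]
--             index += 1
--
--     plaintext = [''] * len(ciphertext)
--     for i, char in enumerate(key):
--         col_index = int(char) - 1
--         for j in range(num_rows):
--             plaintext[col_index + j * len(key)] = matrix[j][i]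
--
--     return ''.join(plaintext).rstrip('x')  # Remove any padding
--
-- def xor_blocks(block1, block2):
--     return ''.join(chr(ord(a) ^ ord(b)) for a, b in zip(block1, block2))
--
-- def decrypt_cbc(encrypted_message, transpose_key, vigenere_key):
--     block_size = 2 * len(transpose_key)
--     blocks = [encrypted_message[i:i + block_size] for i in range(0, len(encrypted_message), block_size)]
--
--     previous_block = '\x00' * block_size  # initial padding block for CBC
--     decrypted_blocks = []
--
--     for block in blocks:
--         vigenere_block = xor_blocks(block, previous_block)
--         transposed_block = vigenere_decipher_ascii(vigenere_block, vigenere_key)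
--         decrypted_block = transposition_decipher_ascii(transposed_block, transpose_key)
--         decrypted_blocks.append(decrypted_block)
--         previous_block = block
--
--     decrypted_message = ''.join(decrypted_blocks)
--     return decrypted_message.rstrip()  # Remove any padding
-- ===== SOURCE B (Python) =====
-- def decrypt_cbc(encrypted_message, transpose_key, vigenere_key):
--     bs = 2 * len(transpose_key)
--     blocks = [encrypted_message[i:i + bs] for i in range(0, len(encrypted_message), bs)]
--     # pass 1: undo the CBC chaining (previous ciphertext block, zero block first)
--     xored = [''.join(chr(ord(a) ^ ord(b)) for a, b in zip(blk, prev))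
--              for blk, prev in zip(blocks, ['\x00' * bs] + blocks[:-1])]
--     # pass 2: per block, autokey Vigenere by index (no key-string growing),
--     # then transposition read back by direct index arithmetic (no inverse key, no matrix)
--     n = len(transpose_key)
--     out = []
--     for x in xored:
--         pt = []
--         for i, ch in enumerate(x):
--             shift = ord(vigenere_key[i]) if i < len(vigenere_key) else ord(pt[i - len(vigenere_key)])
--             pt.append(chr((ord(ch) - shift) % 256))
--         rows = len(pt) // n
--         t = ''.join(pt[(int(transpose_key[c]) - 1) * rows + j]
--                     for j in range(rows) for c in range(n))
--         out.append(t.rstrip('x'))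
--     return ''.join(out).rstrip()
-- ===== Notes on version B (the rewrite author's own statement) =====
-- stated objective: alternative
-- what changed: CBC unmasking becomes one zip pass over (block, previous-block) pairs, the autokey Vigenere indexes the plaintext list instead of growing the key string, and the transposition is inverted in closed form - plaintext char j*n+c is read directly as block[(int(key[c])-1)*rows+j] - eliminating invert_key and the matrix scatter entirely.
-- outside the precondition, e.g. on decrypt_cbc('abcd', '11', 'k'): A returns 'öl', B returns 'ööll'
import Mathlib
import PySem

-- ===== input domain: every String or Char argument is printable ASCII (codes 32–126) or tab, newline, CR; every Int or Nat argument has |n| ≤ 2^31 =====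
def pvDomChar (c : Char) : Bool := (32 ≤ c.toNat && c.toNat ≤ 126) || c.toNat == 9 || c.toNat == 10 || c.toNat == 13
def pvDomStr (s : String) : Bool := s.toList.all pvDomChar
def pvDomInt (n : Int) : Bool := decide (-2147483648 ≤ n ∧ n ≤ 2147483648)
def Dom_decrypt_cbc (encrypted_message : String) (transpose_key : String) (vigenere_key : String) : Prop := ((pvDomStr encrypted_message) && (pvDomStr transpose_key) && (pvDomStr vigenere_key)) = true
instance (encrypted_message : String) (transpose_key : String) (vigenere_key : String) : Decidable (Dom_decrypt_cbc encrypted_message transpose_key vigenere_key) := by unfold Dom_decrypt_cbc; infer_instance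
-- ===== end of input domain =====

-- B re-implements decrypt_cbc with a zip pass for the CBC unmasking, an index-based autokey
-- Vigenère (no growing key string) and a closed-form inverse transposition (no invert_key, no
-- matrix); equal return value on Pre_ (objective: alternative, not claimed faster).

-- ===== PORT A =====
-- shared character-level helpers: both Pythons contain the very same expressions
-- chr(ord(a) ^ ord(b)), chr((ord(c) - shift) % 256), .rstrip('x') and the same block comprehension
def pvChar0 : Char := Char.ofNat 0
def pyXorC (a b : Char) : Char := Char.ofNat (a.toNat ^^^ b.toNat)
def pyDecC (c s : Char) : Char := Char.ofNat (PySem.Int.mod ((c.toNat : Int) - (s.toNat : Int)) 256).toNat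
-- s.rstrip('x'): drop trailing 'x' characters (hand port, exact: the strip set is the single char 'x')
def pyRstripX (cs : List Char) : List Char := (cs.reverse.dropWhile (fun c => c == 'x')).reverse
-- [msg[i:i+bs] for i in range(0, len(msg), bs)]
def pyBlocks (msg : List Char) (bs : Nat) : List (List Char) :=
  (PySem.List.pyRange 0 msg.length bs).map (fun i => PySem.List.slice msg (some i) (some (i + (bs : Int))))

-- xor_blocks: ''.join(chr(ord(a)^ord(b)) for a,b in zip(b1,b2)) (zip truncates to the shorter)
def xorBlocksA (b1 b2 : List Char) : List Char := List.zipWith pyXorC b1 b2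

-- vigenere_decipher_ascii: loop over ciphertext, key_extended grows by each decrypted char
def vigenereDecA : List Char → Nat → List Char → List Char
  | [], _, _ => []
  | c :: rest, i, keyExt =>
    let d := pyDecC c (PySem.List.pyGetD keyExt (i : Int) pvChar0)
    d :: vigenereDecA rest (i + 1) (keyExt ++ [d])

-- invert_key: scatter str(i+1) into slot int(k)-1 of a list of strings, then join
def invertKeyA (key : List Char) : List Char :=
  ((PySem.List.enumerate key).foldl
    (fun inv p => PySem.List.pySetD inv ((PySem.Int.ofChars? [p.2]).getD 0 - 1) (PySem.Int.toChars (p.1 + 1)))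
    (List.replicate key.length [])).flatten

-- transposition_decipher_ascii: build the matrix column by column, then scatter matrix[j][i]
-- into plaintext[int(invkey[i])-1 + j*len(key)], join and rstrip('x')
def transDecA (ct : List Char) (key0 : List Char) : List Char :=
  let rows := ct.length / key0.length
  let key := invertKeyA key0
  let st := (List.range key.length).foldl
    (fun (st : List (List Char) × Nat) _i =>
      (List.range rows).foldl
        (fun (st : List (List Char) × Nat) j =>
          (st.1.set j (st.1.getD j [] ++ [PySem.List.pyGetD ct (st.2 : Int) pvChar0]), st.2 + 1)) st)
    (List.replicate rows [], 0)
  let pl := (PySem.List.enumerate key).foldl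
    (fun pl p =>
      let col := (PySem.Int.ofChars? [p.2]).getD 0 - 1
      (List.range rows).foldl
        (fun pl j => PySem.List.pySetD pl (col + ((j * key.length : Nat) : Int)) [PySem.List.pyGetD (st.1.getD j []) p.1 pvChar0]) pl)
    (List.replicate ct.length ([] : List Char))
  pyRstripX pl.flatten

-- the CBC loop: previous ciphertext block threaded through, blocks decrypted and joined
def cbcLoopA (tk vk : List Char) : List (List Char) → List Char → List Char
  | [], _ => []
  | b :: rest, prev =>
    transDecA (vigenereDecA (xorBlocksA b prev) 0 vk) tk ++ cbcLoopA tk vk rest b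

def decrypt_cbc (encrypted_message : String) (transpose_key : String) (vigenere_key : String) : String :=
  let tkl := transpose_key.toList
  let bs := 2 * tkl.length
  let blocks := pyBlocks encrypted_message.toList bs
  String.ofList (PySem.Chars.rstrip (cbcLoopA tkl vigenere_key.toList blocks (List.replicate bs pvChar0)))

-- ===== PORT B =====
-- autokey Vigenère by index: shift = key[i] if i < len(key) else pt[i - len(key)]
def vigenereDecB (key : List Char) : List Char → Nat → List Char → List Char
  | [], _, pt => pt
  | c :: rest, i, pt =>
    let s := if i < key.length then key.getD i pvChar0 else pt.getD (i - key.length) pvChar0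
    vigenereDecB key rest (i + 1) (pt ++ [pyDecC c s])

-- closed-form inverse transposition: plaintext[j*n+c] = pt[(int(key[c])-1)*rows + j]
def transGatherB (pt : List Char) (tk : List Char) : List Char :=
  let rows := pt.length / tk.length
  (List.range rows).flatMap (fun (j : Nat) =>
    (List.range tk.length).map (fun (c : Nat) =>
      PySem.List.pyGetD pt ((((PySem.Int.ofChars? [tk.getD c pvChar0]).getD 0) - 1) * ((rows : Nat) : Int) + ((j : Nat) : Int)) pvChar0))

def decrypt_cbc_alt (encrypted_message : String) (transpose_key : String) (vigenere_key : String) : String :=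
  let tkl := transpose_key.toList
  let bs := 2 * tkl.length
  let blocks := pyBlocks encrypted_message.toList bs
  let xored := List.zipWith (fun blk prev => List.zipWith pyXorC blk prev)
    blocks (List.replicate bs pvChar0 :: PySem.List.slice blocks none (some (-1)))
  let pts := xored.map (fun x => vigenereDecB vigenere_key.toList x 0 [])
  String.ofList (PySem.Chars.rstrip ((pts.map (fun pt => pyRstripX (transGatherB pt tkl))).flatten))

-- ===== PRECONDITION & SPEC =====
-- Pre_ excludes transpose keys that are not a permutation of the digits 1..len(key) and the empty
-- Vigenère key with a nonempty message: on such inputs A raises (ValueError/IndexError) or, for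
-- duplicate-digit or '0'-digit keys, returns accidental garbage shaped by invert_key's slot
-- collisions and Python's negative-index wraparound — a corner no caller's key ever reaches.
def Pre_decrypt_cbc (encrypted_message : String) (transpose_key : String) (vigenere_key : String) : Prop :=
  transpose_key.toList ≠ [] ∧
  (encrypted_message.toList = [] ∨
    (transpose_key.toList.length ≤ 9 ∧
     transpose_key.toList.Perm ((List.range transpose_key.toList.length).map (fun i => Char.ofNat (49 + i))) ∧
     vigenere_key.toList ≠ []))
instance (encrypted_message : String) (transpose_key : String) (vigenere_key : String) : Decidable (Pre_decrypt_cbc encrypted_message transpose_key vigenere_key) := by unfold Pre_decrypt_cbc; infer_instance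

def pvWitness_decrypt_cbc : String × String × String := ("Hello!", "21", "key")

def Spec_decrypt_cbc (encrypted_message : String) (transpose_key : String) (vigenere_key : String) (out : String) : Prop := out = decrypt_cbc_alt encrypted_message transpose_key vigenere_key
instance (encrypted_message : String) (transpose_key : String) (vigenere_key : String) (out : String) : Decidable (Spec_decrypt_cbc encrypted_message transpose_key vigenere_key out) := by unfold Spec_decrypt_cbc; infer_instance

-- ===== CLAIM (what is proved, stated in full; the proofs are below) =====
def Claim_equal_decrypt_cbc : Prop := ∀ (encrypted_message : String) (transpose_key : String) (vigenere_key : String), Dom_decrypt_cbc encrypted_message transpose_key vigenere_key → Pre_decrypt_cbc encrypted_message transpose_key vigenere_key → Spec_decrypt_cbc encrypted_message transpose_key vigenere_key (decrypt_cbc encrypted_message transpose_key vigenere_key)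

-- ===== LEMMAS AND PROOFS =====

-- pySetD at a nonnegative in-range index is List.set (and both are no-ops past the end)
theorem pySetD_natCast {α : Type} (xs : List α) (n : Nat) (v : α) : PySem.List.pySetD xs (n : Int) v = xs.set n v := by
  simp only [PySem.List.pySetD, PySem.List.pySet?, PySem.List.pyIdx?]
  split_ifs with h1 h2 h3 <;> simp_all
  · rw [List.set_eq_of_length_le]; omega

theorem enum_eq {α : Type} (d : α) (xs : List α) : ∀ (s : Int), PySem.List.enumerate xs s = (List.range xs.length).map (fun (i : Nat) => (s + (i : Int), xs.getD i d)) := by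
  induction xs with
  | nil => intro s; rfl
  | cons a l ih =>
      intro s
      simp [PySem.List.enumerate, List.range_succ_eq_map, ih (s + 1), List.map_map, Function.comp]
      omega

-- ---- Vigenère: A's growing key_extended equals B's indexed lookup ----
theorem getD_append_cases {α : Type} (l1 l2 : List α) (i : Nat) (d : α) :
    (l1 ++ l2).getD i d = if i < l1.length then l1.getD i d else l2.getD (i - l1.length) d := by
  split_ifs with h
  · simp [List.getD, List.getElem?_append_left h]
  · simp [List.getD, List.getElem?_append_right (by omega : l1.length ≤ i)]

theorem vig_eq_aux (key : List Char) (ct : List Char) : ∀ (pt : List Char),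
    vigenereDecB key ct pt.length pt = pt ++ vigenereDecA ct pt.length (key ++ pt) := by
  induction ct with
  | nil => intro pt; simp [vigenereDecA, vigenereDecB]
  | cons c rest ih =>
      intro pt
      simp only [vigenereDecA, vigenereDecB]
      have hd : (if pt.length < key.length then key.getD pt.length pvChar0
          else pt.getD (pt.length - key.length) pvChar0)
          = PySem.List.pyGetD (key ++ pt) (pt.length : Int) pvChar0 := by
        rw [PySem.List.pyGetD_natCast, getD_append_cases]
      rw [hd]
      have := ih (pt ++ [pyDecC c (PySem.List.pyGetD (key ++ pt) (pt.length : Int) pvChar0)])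
      simp only [List.length_append, List.length_cons, List.length_nil] at this
      rw [show pt.length + (0+1) = pt.length + 1 from by omega] at this
      rw [this]
      simp [List.append_assoc]

theorem vig_eq (key ct : List Char) : vigenereDecB key ct 0 [] = vigenereDecA ct 0 key := by
  have h := vig_eq_aux key ct []
  simpa using h

-- ---- generic scatter (foldl of set at nodup positions) ----
theorem foldl_set_length {α : Type} (l : List (Nat × α)) (init : List α) :
    (l.foldl (fun acc pv => acc.set pv.1 pv.2) init).length = init.length := by
  induction l generalizing init with
  | nil => rfl
  | cons p rest ih => simp [ih]

theorem foldl_set_miss {α : Type} (l : List (Nat × α)) (init : List α) (c : Nat)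
    (h : ∀ pv ∈ l, pv.1 ≠ c) :
    (l.foldl (fun acc pv => acc.set pv.1 pv.2) init)[c]? = init[c]? := by
  induction l generalizing init with
  | nil => rfl
  | cons p rest ih =>
      simp only [List.foldl_cons]
      rw [ih _ (fun pv hm => h pv (List.mem_cons_of_mem _ hm))]
      exact List.getElem?_set_ne (h p (List.mem_cons_self) )

theorem foldl_set_hit {α : Type} (l : List (Nat × α)) (init : List α) (c : Nat) (v : α)
    (hnd : (l.map Prod.fst).Nodup) (hmem : (c, v) ∈ l) (hc : c < init.length) :
    (l.foldl (fun acc pv => acc.set pv.1 pv.2) init)[c]? = some v := by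
  induction l generalizing init with
  | nil => cases hmem
  | cons p rest ih =>
      simp only [List.map_cons, List.nodup_cons] at hnd
      rcases List.mem_cons.mp hmem with h | h
      · subst h
        simp only [List.foldl_cons]
        rw [foldl_set_miss _ _ c (by
          intro pv hm hpc
          exact hnd.1 (hpc ▸ (List.mem_map_of_mem hm : pv.1 ∈ rest.map Prod.fst)))]
        exact List.getElem?_set_self hc
      · simp only [List.foldl_cons]
        exact ih _ hnd.2 h (by simpa using hc)

-- ---- digit facts (decidable, bounded) ----
theorem digit_parse : ∀ i < 9, PySem.Int.ofChars? [Char.ofNat (49 + i)] = some ((i : Int) + 1) := by decide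
theorem digit_tostr : ∀ i < 9, PySem.Int.toChars ((i : Nat) + 1) = [Char.ofNat (49 + i)] := by decide
theorem digit_toNat : ∀ i < 9, (Char.ofNat (49 + i)).toNat = 49 + i := by decide

-- ---- matrix build / scatter machinery ----

theorem set_map_range {α : Type} (n r : Nat) (f : Nat → α) (v : α) (hr : r < n) :
    ((List.range n).map f).set r v = (List.range n).map (fun j => if j = r then v else f j) := by
  apply List.ext_getElem
  · simp
  · intro i h1 h2
    simp only [List.length_map, List.length_range] at h1
    simp only [List.getElem_set, List.getElem_map, List.getElem_range]
    by_cases h : i = r <;> simp [h]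
    omega

-- the inner loop of the matrix build
theorem inner_fold (ct : List Char) (m : List (List Char)) (idx : Nat) :
    ∀ (r : Nat), r ≤ m.length →
    (List.range r).foldl
      (fun (st : List (List Char) × Nat) j =>
        (st.1.set j (st.1.getD j [] ++ [PySem.List.pyGetD ct (st.2 : Int) pvChar0]), st.2 + 1)) (m, idx) =
    ((List.range m.length).map (fun j => if j < r then m.getD j [] ++ [PySem.List.pyGetD ct ((idx + j : Nat) : Int) pvChar0] else m.getD j []), idx + r) := by
  intro r
  induction r with
  | zero =>
      intro _
      simp only [List.range_zero, List.foldl_nil, Nat.add_zero]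
      congr 1
      apply List.ext_getElem
      · simp
      · intro i h1 h2
        simp only [List.length_range, List.length_map] at h2 ⊢
        simp [List.getD, List.getElem?_eq_getElem, *]
  | succ r ihr =>
      intro hr
      rw [List.range_succ, List.foldl_append, ihr (by omega)]
      simp only [List.foldl_cons, List.foldl_nil]
      have hgetD : ((List.range m.length).map (fun j => if j < r then m.getD j [] ++ [PySem.List.pyGetD ct ((idx + j : Nat) : Int) pvChar0] else m.getD j [])).getD r []
          = m.getD r [] := by
        rw [List.getD, List.getElem?_map, List.getElem?_range (by omega : r < m.length)]
        simp [List.getD]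
      rw [hgetD, set_map_range _ r _ _ (by omega : r < m.length)]
      refine Prod.ext ?_ (by omega)
      apply List.map_congr_left
      intro j hj
      simp only [List.mem_range] at hj
      by_cases h1 : j = r
      · subst h1; simp
      · by_cases h2 : j < r <;> simp [h1, h2, show (j < r + 1) ↔ (j < r ∨ j = r) from by omega, *]

theorem matrix_build (ct : List Char) (rows : Nat) : ∀ (nk : Nat),
    (List.range nk).foldl
      (fun (st : List (List Char) × Nat) _i =>
        (List.range rows).foldl
          (fun (st : List (List Char) × Nat) j =>
            (st.1.set j (st.1.getD j [] ++ [PySem.List.pyGetD ct (st.2 : Int) pvChar0]), st.2 + 1)) st)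
      (List.replicate rows [], 0) =
    ((List.range rows).map (fun j => (List.range nk).map (fun i => PySem.List.pyGetD ct ((i * rows + j : Nat) : Int) pvChar0)), nk * rows) := by
  intro nk
  induction nk with
  | zero =>
      simp only [List.range_zero, List.foldl_nil, Nat.zero_mul]
      congr 1
      apply List.ext_getElem
      · simp
      · intro i h1 h2
        simp [List.getElem_replicate]
  | succ nk ih =>
      rw [List.range_succ, List.foldl_append, ih]
      simp only [List.foldl_cons, List.foldl_nil]
      have hlen : ((List.range rows).map (fun j => (List.range nk).map (fun i => PySem.List.pyGetD ct ((i * rows + j : Nat) : Int) pvChar0))).length = rows := by simp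
      rw [inner_fold ct _ (nk * rows) rows (by rw [hlen])]
      rw [hlen]
      refine Prod.ext ?_ (by simp; ring)
      apply List.map_congr_left
      intro j hj
      simp only [List.mem_range] at hj
      simp only [hj, if_pos]
      rw [List.getD, List.getElem?_map, List.getElem?_range hj]
      simp only [Option.map_some, Option.getD_some]
      rw [List.map_append]
      simp

-- ---- transpose-key permutation facts ----
def keyIdx (tkl : List Char) (i : Nat) : Nat := (tkl.getD i pvChar0).toNat - 49
def invIdx (tkl : List Char) (c : Nat) : Nat := List.idxOf (Char.ofNat (49 + c)) tkl

theorem digits_nodup (n : Nat) (hn : n ≤ 9) : ((List.range n).map (fun i => Char.ofNat (49 + i))).Nodup := by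
  apply List.Nodup.map_on _ (List.nodup_range)
  intro x hx y hy hxy
  simp only [List.mem_range] at hx hy
  have h1 := digit_toNat x (by omega)
  have h2 := digit_toNat y (by omega)
  rw [hxy] at h1
  omega
theorem pre_getD (tkl : List Char) (hn : tkl.length ≤ 9)
    (hperm : tkl.Perm ((List.range tkl.length).map (fun i => Char.ofNat (49 + i))))
    (i : Nat) (hi : i < tkl.length) :
    tkl.getD i pvChar0 = Char.ofNat (49 + keyIdx tkl i) ∧ keyIdx tkl i < tkl.length := by
  have hmem : tkl.getD i pvChar0 ∈ tkl := by
    rw [List.getD_eq_getElem _ _ hi]; exact List.getElem_mem hi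
  have : tkl.getD i pvChar0 ∈ (List.range tkl.length).map (fun i => Char.ofNat (49 + i)) :=
    hperm.mem_iff.mp hmem
  simp only [List.mem_map, List.mem_range] at this
  obtain ⟨v, hv, heq⟩ := this
  have htn := digit_toNat v (by omega)
  unfold keyIdx
  rw [← heq, htn] at *
  constructor
  · rw [← heq]; congr 1; omega
  · omega

theorem pre_inv (tkl : List Char) (hn : tkl.length ≤ 9)
    (hperm : tkl.Perm ((List.range tkl.length).map (fun i => Char.ofNat (49 + i))))
    (c : Nat) (hc : c < tkl.length) :
    invIdx tkl c < tkl.length ∧ tkl.getD (invIdx tkl c) pvChar0 = Char.ofNat (49 + c) := by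
  have hmem : Char.ofNat (49 + c) ∈ tkl := by
    apply hperm.mem_iff.mpr
    simp only [List.mem_map, List.mem_range]
    exact ⟨c, hc, rfl⟩
  have hlt : invIdx tkl c < tkl.length := List.idxOf_lt_length_of_mem hmem
  refine ⟨hlt, ?_⟩
  rw [List.getD_eq_getElem _ _ hlt]
  exact List.getElem_idxOf hlt

theorem keyIdx_invIdx (tkl : List Char) (hn : tkl.length ≤ 9)
    (hperm : tkl.Perm ((List.range tkl.length).map (fun i => Char.ofNat (49 + i))))
    (c : Nat) (hc : c < tkl.length) : keyIdx tkl (invIdx tkl c) = c := by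
  obtain ⟨hlt, heq⟩ := pre_inv tkl hn hperm c hc
  unfold keyIdx
  rw [heq, digit_toNat c (by omega)]
  omega

theorem tkl_nodup (tkl : List Char) (hn : tkl.length ≤ 9)
    (hperm : tkl.Perm ((List.range tkl.length).map (fun i => Char.ofNat (49 + i)))) : tkl.Nodup :=
  (hperm.nodup_iff).mpr (digits_nodup _ hn)

theorem invIdx_keyIdx (tkl : List Char) (hn : tkl.length ≤ 9)
    (hperm : tkl.Perm ((List.range tkl.length).map (fun i => Char.ofNat (49 + i))))
    (i : Nat) (hi : i < tkl.length) : invIdx tkl (keyIdx tkl i) = i := by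
  obtain ⟨hgd, hklt⟩ := pre_getD tkl hn hperm i hi
  obtain ⟨hlt, heq⟩ := pre_inv tkl hn hperm (keyIdx tkl i) hklt
  have : tkl[invIdx tkl (keyIdx tkl i)]'hlt = tkl[i]'hi := by
    rw [← List.getD_eq_getElem _ pvChar0 hlt, ← List.getD_eq_getElem _ pvChar0 hi, heq, hgd]
  exact ((tkl_nodup tkl hn hperm).getElem_inj_iff).mp this

theorem keyIdx_inj (tkl : List Char) (hn : tkl.length ≤ 9)
    (hperm : tkl.Perm ((List.range tkl.length).map (fun i => Char.ofNat (49 + i))))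
    (i j : Nat) (hi : i < tkl.length) (hj : j < tkl.length) (h : keyIdx tkl i = keyIdx tkl j) : i = j := by
  have h1 := invIdx_keyIdx tkl hn hperm i hi
  have h2 := invIdx_keyIdx tkl hn hperm j hj
  rw [← h1, ← h2, h]

-- ---- invert_key characterisation ----
theorem flatten_singletons {α β : Type} (l : List α) (f : α → β) :
    (l.map (fun a => [f a])).flatten = l.map f := by
  induction l <;> simp_all

theorem invertKey_eq (tkl : List Char) (hn : tkl.length ≤ 9)
    (hperm : tkl.Perm ((List.range tkl.length).map (fun i => Char.ofNat (49 + i)))) :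
    invertKeyA tkl = ((List.range tkl.length).map (fun c => [Char.ofNat (49 + invIdx tkl c)])).flatten := by
  unfold invertKeyA
  rw [enum_eq pvChar0 tkl 0, List.foldl_map]
  rw [PySem.List.foldl_congr_mem _ _
    (fun (acc : List (List Char)) (i : Nat) => acc.set (keyIdx tkl i) [Char.ofNat (49 + i)]) _ ?_]
  · rw [← List.foldl_map (f := fun (i : Nat) => (keyIdx tkl i, [Char.ofNat (49 + i)]))
      (g := fun (acc : List (List Char)) pv => acc.set pv.1 pv.2)]
    congr 1
    apply List.ext_getElem?
    intro c
    by_cases hc : c < tkl.length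
    · rw [foldl_set_hit _ _ c [Char.ofNat (49 + invIdx tkl c)] ?_ ?_ (by simpa using hc)]
      · rw [List.getElem?_map, List.getElem?_range hc]; rfl
      · rw [List.map_map]
        apply List.Nodup.map_on _ List.nodup_range
        intro x hx y hy hxy
        simp only [List.mem_range] at hx hy
        exact keyIdx_inj tkl hn hperm x y hx hy hxy
      · have hinv := pre_inv tkl hn hperm c hc
        have hki := keyIdx_invIdx tkl hn hperm c hc
        have : (c, [Char.ofNat (49 + invIdx tkl c)])
            = (fun (i : Nat) => (keyIdx tkl i, [Char.ofNat (49 + i)])) (invIdx tkl c) := by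
          simp [hki]
        rw [this]
        exact List.mem_map_of_mem (by simp [hinv.1])
    · rw [foldl_set_miss, List.getElem?_eq_none (by simpa using (by omega : tkl.length ≤ c)),
        List.getElem?_eq_none (by simp; omega)]
      intro pv hpv
      simp only [List.mem_map, List.mem_range] at hpv
      obtain ⟨i, hi, rfl⟩ := hpv
      have := (pre_getD tkl hn hperm i hi).2
      simp only
      omega
  · intro acc i hi
    simp only [List.mem_range] at hi
    obtain ⟨hgd, hk⟩ := pre_getD tkl hn hperm i hi
    simp only [hgd]
    rw [digit_parse (keyIdx tkl i) (by omega)]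
    have h1 : (((keyIdx tkl i : Nat) : Int) + 1 : Int) - 1 = ((keyIdx tkl i : Nat) : Int) := by ring
    have h2 : ((0 : Int) + (i : Int) + 1) = (((i : Nat) : Int) + 1) := by ring
    rw [Option.getD_some, h1, h2, digit_tostr i (by omega), pySetD_natCast]

-- ---- gather-side helpers ----
def ctAt (ct : List Char) (k : Nat) : Char := PySem.List.pyGetD ct (k : Int) pvChar0

theorem getD_map_range' {α : Type} (n j : Nat) (f : Nat → α) (d : α) (hj : j < n) :
    ((List.range n).map f).getD j d = f j := by
  rw [List.getD_eq_getElem _ _ (by simpa using hj)]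
  simp

theorem flatMap_range_prod {α : Type} (n : Nat) (hn : 0 < n) (h : Nat → Nat → α) : ∀ (rows : Nat),
    (List.range rows).flatMap (fun j => (List.range n).map (fun c => h j c))
      = (List.range (rows * n)).map (fun p => h (p / n) (p % n)) := by
  intro rows
  induction rows with
  | zero => simp
  | succ r ih =>
      rw [List.range_succ, List.flatMap_append, ih, Nat.succ_mul, List.range_add, List.map_append]
      congr 1
      simp only [List.flatMap_cons, List.flatMap_nil, List.append_nil, List.map_map]
      apply List.map_congr_left
      intro c hc
      simp only [List.mem_range] at hc
      have h1 : (r * n + c) / n = r := by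
        rw [Nat.mul_comm r n, Nat.mul_add_div hn, Nat.div_eq_of_lt hc, Nat.add_zero]
      have h2 : (r * n + c) % n = c := by
        rw [Nat.mul_comm r n, Nat.mul_add_mod, Nat.mod_eq_of_lt hc]
      simp [Function.comp, h1, h2]

theorem scatter_char (n rows L : Nat) (hn0 : 0 < n)
    (pos : Nat → Nat) (hposlt : ∀ i, i < n → pos i < n)
    (posinv : Nat → Nat) (hpi : ∀ c, c < n → posinv c < n ∧ pos (posinv c) = c)
    (hip : ∀ i j, i < n → j < n → pos i = pos j → i = j)
    (val : Nat → Nat → List Char) (hrowsL : n * rows ≤ L) :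
    (List.range n).foldl
      (fun pl i => ((List.range rows).map (fun j => (pos i + j * n, val i j))).foldl
        (fun acc pv => acc.set pv.1 pv.2) pl)
      (List.replicate L ([] : List Char))
    = (List.range L).map (fun p => if p < n * rows then val (posinv (p % n)) (p / n) else []) := by
  have hstep : (List.range n).foldl
      (fun pl i => ((List.range rows).map (fun j => (pos i + j * n, val i j))).foldl
        (fun acc pv => acc.set pv.1 pv.2) pl)
      (List.replicate L ([] : List Char))
      = (((List.range n).map (fun i => (List.range rows).map (fun j => (pos i + j * n, val i j)))).flatten).foldl
        (fun acc pv => acc.set pv.1 pv.2) (List.replicate L ([] : List Char)) := by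
    rw [List.foldl_flatten, List.foldl_map]
  rw [hstep]
  have hnd : ((((List.range n).map (fun i => (List.range rows).map (fun j => (pos i + j * n, val i j)))).flatten).map Prod.fst).Nodup := by
    rw [List.map_flatten, List.map_map]
    rw [List.nodup_flatten]
    constructor
    · intro l hl
      simp only [List.mem_map, List.mem_range] at hl
      obtain ⟨i, hi, rfl⟩ := hl
      simp only [Function.comp, List.map_map]
      apply List.Nodup.map_on _ List.nodup_range
      intro x hx y hy hxy
      simp only at hxy
      exact Nat.eq_of_mul_eq_mul_right hn0 (Nat.add_left_cancel hxy)
    · have base : (List.range n).Pairwise (fun a b => a < b ∧ a < n ∧ b < n) := by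
        apply List.Pairwise.imp_of_mem ?_ List.pairwise_lt_range
        intro a b ha hb h
        exact ⟨h, List.mem_range.mp ha, List.mem_range.mp hb⟩
      apply (List.pairwise_map).mpr
      apply base.imp ?_
      intro a b hR
      obtain ⟨hlt, hia, hib⟩ := hR
      intro x hxa hxb
      simp only [Function.comp_apply, List.map_map, List.mem_map, List.mem_range, Function.comp] at hxa hxb
      obtain ⟨j1, hj1, he1⟩ := hxa
      obtain ⟨j2, hj2, he2⟩ := hxb
      have hp1 : x % n = pos a := by
        rw [← he1, Nat.add_mul_mod_self_right, Nat.mod_eq_of_lt (hposlt a hia)]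
      have hp2 : x % n = pos b := by
        rw [← he2, Nat.add_mul_mod_self_right, Nat.mod_eq_of_lt (hposlt b hib)]
      have : a = b := hip a b hia hib (by omega)
      omega
  have hlen : ((((List.range n).map (fun i => (List.range rows).map (fun j => (pos i + j * n, val i j)))).flatten).foldl
        (fun acc pv => acc.set pv.1 pv.2) (List.replicate L ([] : List Char))).length = L := by
    rw [foldl_set_length]; simp
  apply List.ext_getElem?
  intro p
  by_cases hpL : p < L
  · by_cases hp : p < n * rows
    · have hc : p % n < n := Nat.mod_lt _ hn0
      have hj : p / n < rows := (Nat.div_lt_iff_lt_mul hn0).mpr (Nat.mul_comm n rows ▸ hp)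
      obtain ⟨hpin, hppos⟩ := hpi (p % n) hc
      rw [foldl_set_hit _ _ p (val (posinv (p % n)) (p / n)) hnd ?_ (by simpa using hpL)]
      · rw [List.getElem?_map, List.getElem?_range hpL]
        simp [hp]
      · apply List.mem_flatten.mpr
        refine ⟨(List.range rows).map (fun j => (pos (posinv (p % n)) + j * n, val (posinv (p % n)) j)), ?_, ?_⟩
        · exact List.mem_map_of_mem (List.mem_range.mpr hpin)
        · have : (p, val (posinv (p % n)) (p / n))
              = (fun j => (pos (posinv (p % n)) + j * n, val (posinv (p % n)) j)) (p / n) := by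
            rw [hppos]
            show (p, val (posinv (p % n)) (p / n)) = (p % n + p / n * n, val (posinv (p % n)) (p / n))
            rw [Nat.mod_add_div']
          rw [this]
          exact List.mem_map_of_mem (List.mem_range.mpr hj)
    · rw [foldl_set_miss]
      · rw [List.getElem?_map, List.getElem?_range hpL, List.getElem?_replicate]
        simp [hpL, hp]
      · intro pv hpv
        simp only [List.mem_flatten, List.mem_map, List.mem_range] at hpv
        obtain ⟨l, ⟨i, hi, rfl⟩, hmem⟩ := hpv
        simp only [List.mem_map, List.mem_range] at hmem
        obtain ⟨j, hjr, rfl⟩ := hmem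
        simp only
        have h1 : pos i < n := hposlt i hi
        have h2 : (j + 1) * n ≤ rows * n := Nat.mul_le_mul_right n (by omega)
        have h3 : (j + 1) * n = j * n + n := by ring
        have h4 : rows * n = n * rows := Nat.mul_comm _ _
        omega
  · rw [List.getElem?_eq_none (by rw [hlen]; omega), List.getElem?_eq_none (by simp; omega)]

theorem flatten_prefix (L k : Nat) (hk : k ≤ L) (g : Nat → Char) :
    ((List.range L).map (fun p => if p < k then [g p] else [])).flatten = (List.range k).map g := by
  rw [show L = k + (L - k) from by omega, List.range_add, List.map_append, List.flatten_append]
  have h2 : ((List.map (fun x => k + x) (List.range (L - k))).map (fun p => if p < k then [g p] else [])).flatten = [] := by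
    rw [List.flatten_eq_nil_iff]
    intro l hl
    simp only [List.map_map, List.mem_map, List.mem_range] at hl
    obtain ⟨q, hq, rfl⟩ := hl
    simp only [Function.comp]
    rw [if_neg (by omega)]
  rw [h2, List.append_nil]
  rw [List.map_congr_left (fun p hp => if_pos (List.mem_range.mp hp)), flatten_singletons]

theorem invertKey_eq' (tkl : List Char) (hn : tkl.length ≤ 9)
    (hperm : tkl.Perm ((List.range tkl.length).map (fun i => Char.ofNat (49 + i)))) :
    invertKeyA tkl = (List.range tkl.length).map (fun c => Char.ofNat (49 + invIdx tkl c)) := by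
  rw [invertKey_eq tkl hn hperm]
  exact flatten_singletons _ _

-- ---- the per-block equality: A's transposition of a block = B's closed-form gather ----
theorem trans_eq (tkl : List Char) (hne : tkl ≠ []) (hn : tkl.length ≤ 9)
    (hperm : tkl.Perm ((List.range tkl.length).map (fun i => Char.ofNat (49 + i))))
    (ct : List Char) :
    transDecA ct tkl = pyRstripX (transGatherB ct tkl) := by
  have hn0 : 0 < tkl.length := by
    cases tkl
    · exact absurd rfl hne
    · simp
  unfold transDecA transGatherB
  simp only [invertKey_eq' tkl hn hperm, List.length_map, List.length_range]
  rw [matrix_build ct (ct.length / tkl.length) tkl.length]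
  rw [enum_eq pvChar0 _ 0]
  simp only [List.length_map, List.length_range]
  rw [List.foldl_map]
  rw [PySem.List.foldl_congr_mem _ _
    (fun pl (i : Nat) => ((List.range (ct.length / tkl.length)).map
        (fun j => (invIdx tkl i + j * tkl.length, [ctAt ct (i * (ct.length / tkl.length) + j)]))).foldl
      (fun acc pv => acc.set pv.1 pv.2) pl) _ ?_]
  · rw [scatter_char tkl.length (ct.length / tkl.length) ct.length hn0 (invIdx tkl)
      (fun i hi => (pre_inv tkl hn hperm i hi).1) (keyIdx tkl)
      (fun c hc => ⟨(pre_getD tkl hn hperm c hc).2, invIdx_keyIdx tkl hn hperm c hc⟩)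
      (fun i j hi hj hij => by
        have h1 := keyIdx_invIdx tkl hn hperm i hi
        have h2 := keyIdx_invIdx tkl hn hperm j hj
        rw [← h1, ← h2, hij])
      (fun i j => [ctAt ct (i * (ct.length / tkl.length) + j)])
      (by rw [Nat.mul_comm]; exact Nat.div_mul_le_self _ _)]
    rw [flatten_prefix ct.length (tkl.length * (ct.length / tkl.length))
      (by rw [Nat.mul_comm]; exact Nat.div_mul_le_self _ _)
      (fun p => ctAt ct (keyIdx tkl (p % tkl.length) * (ct.length / tkl.length) + p / tkl.length))]
    have hB : (List.range (ct.length / tkl.length)).flatMap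
        (fun (j : Nat) => (List.range tkl.length).map (fun (c : Nat) =>
          PySem.List.pyGetD ct ((((PySem.Int.ofChars? [tkl.getD c pvChar0]).getD 0) - 1) * (((ct.length / tkl.length : Nat) : Nat) : Int) + ((j : Nat) : Int)) pvChar0))
        = (List.range ((ct.length / tkl.length) * tkl.length)).map
          (fun p => ctAt ct (keyIdx tkl (p % tkl.length) * (ct.length / tkl.length) + p / tkl.length)) := by
      rw [← flatMap_range_prod tkl.length hn0
        (fun j c => ctAt ct (keyIdx tkl c * (ct.length / tkl.length) + j)) (ct.length / tkl.length)]
      rw [List.flatMap_def, List.flatMap_def]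
      congr 1
      apply List.map_congr_left
      intro j _
      apply List.map_congr_left
      intro c hc
      rw [List.mem_range] at hc
      obtain ⟨hgd, hklt⟩ := pre_getD tkl hn hperm c hc
      rw [hgd, digit_parse (keyIdx tkl c) (by omega), Option.getD_some]
      have hcast : (((keyIdx tkl c : Nat) : Int) + 1 - 1) * ((ct.length / tkl.length : Nat) : Int) + ((j : Nat) : Int)
          = ((keyIdx tkl c * (ct.length / tkl.length) + j : Nat) : Int) := by push_cast; ring
      rw [hcast]
      rfl
    rw [hB, Nat.mul_comm]
  · intro acc i hi
    rw [List.mem_range] at hi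
    have hgd : (List.map (fun c => Char.ofNat (49 + invIdx tkl c)) (List.range tkl.length)).getD i pvChar0
        = Char.ofNat (49 + invIdx tkl i) := getD_map_range' _ _ _ _ hi
    have hinv : invIdx tkl i < tkl.length := (pre_inv tkl hn hperm i hi).1
    simp only [hgd, digit_parse (invIdx tkl i) (by omega), Option.getD_some]
    rw [PySem.List.foldl_congr_mem _ _
      (fun acc (j : Nat) => acc.set (invIdx tkl i + j * tkl.length) [ctAt ct (i * (ct.length / tkl.length) + j)]) _ ?_]
    · simp [List.foldl_map]
    · intro acc' j hj
      rw [List.mem_range] at hj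
      rw [getD_map_range' _ j _ _ hj]
      have hval : PySem.List.pyGetD
          ((List.range tkl.length).map (fun i' => PySem.List.pyGetD ct (((i' * (ct.length / tkl.length) + j : Nat) : Int)) pvChar0))
          ((0 : Int) + (i : Int)) pvChar0 = ctAt ct (i * (ct.length / tkl.length) + j) := by
        rw [zero_add, PySem.List.pyGetD_natCast, getD_map_range' _ i _ _ hi]
        rfl
      rw [hval]
      have hpos : ((invIdx tkl i : Nat) : Int) + 1 - 1 + ((j * tkl.length : Nat) : Int)
          = ((invIdx tkl i + j * tkl.length : Nat) : Int) := by push_cast; ring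
      rw [hpos, pySetD_natCast]

-- ---- final assembly ----
theorem slice_neg_one {α : Type} (xs : List α) : PySem.List.slice xs none (some (-1)) = xs.dropLast := by
  simp [PySem.List.slice, List.dropLast_eq_take]

theorem cbc_assemble (tk vk : List Char) (blocks : List (List Char)) : ∀ (prev : List Char),
    cbcLoopA tk vk blocks prev
      = ((List.zipWith (fun blk pb => List.zipWith pyXorC blk pb) blocks (prev :: blocks.dropLast)).map
          (fun x => transDecA (vigenereDecA x 0 vk) tk)).flatten := by
  induction blocks with
  | nil => intro prev; rfl
  | cons b rest ih =>
      intro prev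
      cases rest with
      | nil => simp [cbcLoopA, xorBlocksA]
      | cons b2 rest2 =>
          have h2 := ih b
          simp only [cbcLoopA, xorBlocksA, List.dropLast_cons₂, List.zipWith_cons_cons,
            List.map_cons, List.flatten_cons] at h2 ⊢
          rw [List.append_cancel_left h2]

-- ===== VERDICT (by name: the statement is the Claim_ definition above) =====
theorem decrypt_cbc_spec : Claim_equal_decrypt_cbc := by
  intro em tk vk hdom hpre
  obtain ⟨hne, hcase⟩ := hpre
  rcases hcase with hemp | ⟨hn, hperm, _⟩
  · unfold Spec_decrypt_cbc decrypt_cbc decrypt_cbc_alt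
    rw [hemp]
    simp [pyBlocks, PySem.List.pyRange, cbcLoopA]
  unfold Spec_decrypt_cbc decrypt_cbc decrypt_cbc_alt
  apply congrArg String.ofList
  apply congrArg PySem.Chars.rstrip
  rw [slice_neg_one, cbc_assemble, List.map_map]
  apply congrArg List.flatten
  apply List.map_congr_left
  intro x _
  simp only [Function.comp]
  rw [trans_eq tk.toList hne hn hperm, vig_eq]
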